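-- pv_equiv track=rewrite | github.com/arsenelupin0/BignessLeague-DiscordBot | src/bigness_league_bot/infrastructure/discord/team_profile_image_drawing.py | _build_row_rects
-- ===== SOURCE A (Python) =====
-- def _accumulate_boundaries(
--         start_x: int,
--         widths: tuple[int, ...],
-- ) -> tuple[int, ...]:
--     boundaries = [start_x]
--     current = start_x
--     for width in widths:
--         current += width
--         boundaries.append(current)
--
--     return tuple(boundaries)
--
-- def _build_row_rects(
--         start_x: int,
--         start_y: int,
--         widths: tuple[int, ...],
--         row_height: int,
-- ) -> tuple[tuple[int, int, int, int], ...]: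
--     boundaries = _accumulate_boundaries(start_x, widths)
--     rects: list[tuple[int, int, int, int]] = []
--     for left, right in zip(boundaries, boundaries[1:]):
--         rects.append((left, start_y, right, start_y + row_height))
--
--     return tuple(rects)
-- ===== SOURCE B (Python) =====
-- def _build_row_rects(
--         start_x: int,
--         start_y: int,
--         widths: tuple[int, ...],
--         row_height: int,
-- ) -> tuple[tuple[int, int, int, int], ...]:
--     rects = []
--     left = start_x
--     for width in widths:
--         right = left + width
--         rects.append((left, start_y, right, start_y + row_height))
--         left = right
--     return tuple(rects)
-- ===== Notes on version B (the rewrite author's own statement) =====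
-- stated objective: simpler
-- what changed: Eliminates the intermediate boundaries table and the zip of consecutive pairs: a single pass keeps one running left edge and emits each rectangle directly.
import Mathlib
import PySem

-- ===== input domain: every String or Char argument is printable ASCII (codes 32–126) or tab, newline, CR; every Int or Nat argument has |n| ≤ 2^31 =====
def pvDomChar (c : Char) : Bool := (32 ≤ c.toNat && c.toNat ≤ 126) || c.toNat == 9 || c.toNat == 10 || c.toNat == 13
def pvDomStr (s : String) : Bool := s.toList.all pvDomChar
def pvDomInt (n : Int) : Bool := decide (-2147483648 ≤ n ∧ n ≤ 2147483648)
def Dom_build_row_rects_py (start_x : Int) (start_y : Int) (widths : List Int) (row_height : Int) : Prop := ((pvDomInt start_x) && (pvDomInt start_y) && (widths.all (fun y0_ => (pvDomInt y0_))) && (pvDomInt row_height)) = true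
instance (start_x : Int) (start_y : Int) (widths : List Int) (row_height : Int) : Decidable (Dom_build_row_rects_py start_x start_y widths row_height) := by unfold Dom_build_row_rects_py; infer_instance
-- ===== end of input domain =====

-- B replaces the boundaries table + zip of consecutive pairs with a single pass
-- keeping one running left edge (objective: simpler).

-- ===== PORT A =====
-- _accumulate_boundaries: loop appending the running total to the boundaries list.
def accumulate_boundaries_py (start_x : Int) (widths : List Int) : List Int :=
  (widths.foldl (fun (st : List Int × Int) w => (st.1 ++ [st.2 + w], st.2 + w))
    ([start_x], start_x)).1

def build_row_rects_py (start_x : Int) (start_y : Int) (widths : List Int) (row_height : Int) : List (Int × Int × Int × Int) :=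
  let boundaries := accumulate_boundaries_py start_x widths
  -- zip(boundaries, boundaries[1:])
  ((boundaries.zip (PySem.List.slice boundaries (some 1) none)).foldl
    (fun rects lr => rects ++ [(lr.1, start_y, lr.2, start_y + row_height)]) [])

-- ===== PORT B =====
-- single pass: running left edge, emit each rectangle directly
def build_row_rects_alt_go (start_y : Int) (row_height : Int) (left : Int) : List Int → List (Int × Int × Int × Int)
  | [] => []
  | w :: ws => (left, start_y, left + w, start_y + row_height) :: build_row_rects_alt_go start_y row_height (left + w) ws

def build_row_rects_py_alt (start_x : Int) (start_y : Int) (widths : List Int) (row_height : Int) : List (Int × Int × Int × Int) :=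
  build_row_rects_alt_go start_y row_height start_x widths

-- ===== PRECONDITION & SPEC =====
def Spec_build_row_rects_py (start_x : Int) (start_y : Int) (widths : List Int) (row_height : Int) (out : List (Int × Int × Int × Int)) : Prop := out = build_row_rects_py_alt start_x start_y widths row_height
instance (start_x : Int) (start_y : Int) (widths : List Int) (row_height : Int) (out : List (Int × Int × Int × Int)) : Decidable (Spec_build_row_rects_py start_x start_y widths row_height out) := by unfold Spec_build_row_rects_py; infer_instance

-- ===== CLAIM (what is proved, stated in full; the proofs are below) =====
def Claim_equal_build_row_rects_py : Prop := ∀ (start_x : Int) (start_y : Int) (widths : List Int) (row_height : Int), Dom_build_row_rects_py start_x start_y widths row_height → Spec_build_row_rects_py start_x start_y widths row_height (build_row_rects_py start_x start_y widths row_height)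

-- ===== LEMMAS AND PROOFS =====

theorem acc_fst_append (ws : List Int) (a bs : List Int) (c : Int) :
    (ws.foldl (fun (st : List Int × Int) w => (st.1 ++ [st.2 + w], st.2 + w)) (a ++ bs, c)).1
      = a ++ (ws.foldl (fun (st : List Int × Int) w => (st.1 ++ [st.2 + w], st.2 + w)) (bs, c)).1 := by
  induction ws generalizing bs c with
  | nil => rfl
  | cons w ws ih =>
    simp only [List.foldl_cons, List.append_assoc]
    exact ih (bs ++ [c + w]) (c + w)

theorem acc_cons (s w : Int) (ws : List Int) :
    accumulate_boundaries_py s (w :: ws) = s :: accumulate_boundaries_py (s + w) ws := by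
  unfold accumulate_boundaries_py
  simp only [List.foldl_cons]
  have := acc_fst_append ws [s] [s + w] (s + w)
  simpa using this

theorem acc_head (s : Int) (ws : List Int) :
    ∃ rest, accumulate_boundaries_py s ws = s :: rest := by
  cases ws with
  | nil => exact ⟨[], rfl⟩
  | cons w ws => exact ⟨accumulate_boundaries_py (s + w) ws, acc_cons s w ws⟩

theorem foldl_append_rects (y h : Int) (ps : List (Int × Int)) (acc : List (Int × Int × Int × Int)) :
    ps.foldl (fun rects lr => rects ++ [(lr.1, y, lr.2, y + h)]) acc
      = acc ++ ps.map (fun lr => (lr.1, y, lr.2, y + h)) := by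
  induction ps generalizing acc with
  | nil => simp
  | cons p ps ih => simp [ih]

theorem zip_tail_eq_go (ws : List Int) (s y h : Int) :
    ((accumulate_boundaries_py s ws).zip (accumulate_boundaries_py s ws).tail).map
        (fun lr => (lr.1, y, lr.2, y + h))
      = build_row_rects_alt_go y h s ws := by
  induction ws generalizing s with
  | nil =>
    simp [accumulate_boundaries_py, build_row_rects_alt_go]
  | cons w ws ih =>
    obtain ⟨rest, hrest⟩ := acc_head (s + w) ws
    rw [acc_cons, hrest]
    simp only [List.tail_cons, List.zip_cons_cons, List.map_cons, build_row_rects_alt_go]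
    have : rest = ((s + w) :: rest).tail := rfl
    rw [← hrest, this, ← hrest, ih]

theorem build_row_rects_py_eq (s y : Int) (ws : List Int) (h : Int) :
    build_row_rects_py s y ws h = build_row_rects_py_alt s y ws h := by
  unfold build_row_rects_py build_row_rects_py_alt
  simp only []
  rw [show ∀ (xs : List Int), PySem.List.slice xs (some 1) none = xs.tail from PySem.List.slice_from_one,
      foldl_append_rects]
  simpa using zip_tail_eq_go ws s y h

-- ===== VERDICT (by name: the statement is the Claim_ definition above) =====
theorem build_row_rects_py_spec : Claim_equal_build_row_rects_py := by
  intro sx sy ws rh _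
  unfold Spec_build_row_rects_py
  exact build_row_rects_py_eq sx sy ws rh
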